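-- pv_equiv track=rewrite | github.com/ncoledavis/Animal-Leg-Count-in-the-Forest | 4LeggedAnimalCheck.py | four_legged_animals
-- ===== SOURCE A (Python) =====
-- animals = ['lion', 'tiger', 'bear', 'dog']
--
-- def four_legged_animals(user_list):
--     matches = [a for a in user_list if  a in animals]
--     count = len(matches)
--
--     if count == 0:
--         explanation = "There are no 4 legged animals."
--     elif count == 1:
--         explanation = f"'{matches[0]}' has four legs."
--     elif count == 2:
--         explanation = f"'{matches[0]}' and '{matches[1]}' have four legs."
--     else:
--         explanation = (
--             ", ".join(f"'{m}'" for m in matches[:-1])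
--             + f", and '{matches[-1]}' have four legs."
--         )
--
--     return f"Count: {count}. Explanation: From the selected inputs {explanation}"
-- ===== SOURCE B (Python) =====
-- ANIMALS = {'lion', 'tiger', 'bear', 'dog'}
--
-- def four_legged_animals(user_list):
--     # Two passes, no intermediate matches list and no branching on 1/2/3:
--     # first count the hits, then emit each hit with a separator chosen
--     # from its position (first / pair / last / middle), joined once.
--     n = sum(a in ANIMALS for a in user_list)
--     if n == 0:
--         explanation = "There are no 4 legged animals."
--     else:
--         pieces = []
--         j = 0
--         for a in user_list:
--             if a in ANIMALS:
--                 if j == 0: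
--                     sep = ""
--                 elif n == 2:
--                     sep = " and "
--                 elif j == n - 1:
--                     sep = ", and "
--                 else:
--                     sep = ", "
--                 pieces.append(sep + "'" + a + "'")
--                 j += 1
--         explanation = "".join(pieces) + (" has" if n == 1 else " have") + " four legs."
--     return "Count: " + str(n) + ". Explanation: From the selected inputs " + explanation
-- ===== Notes on version B (the rewrite author's own statement) =====
-- stated objective: alternative
-- what changed: B never materializes a matches list and never branches on count 1/2/3 to pick a sentence shape: it counts hits in one pass, then a second indexed pass over user_list emits each hit prefixed by a separator chosen from its position (first / pair / last / middle), joined once; only count==0 stays special.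
import Mathlib
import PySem

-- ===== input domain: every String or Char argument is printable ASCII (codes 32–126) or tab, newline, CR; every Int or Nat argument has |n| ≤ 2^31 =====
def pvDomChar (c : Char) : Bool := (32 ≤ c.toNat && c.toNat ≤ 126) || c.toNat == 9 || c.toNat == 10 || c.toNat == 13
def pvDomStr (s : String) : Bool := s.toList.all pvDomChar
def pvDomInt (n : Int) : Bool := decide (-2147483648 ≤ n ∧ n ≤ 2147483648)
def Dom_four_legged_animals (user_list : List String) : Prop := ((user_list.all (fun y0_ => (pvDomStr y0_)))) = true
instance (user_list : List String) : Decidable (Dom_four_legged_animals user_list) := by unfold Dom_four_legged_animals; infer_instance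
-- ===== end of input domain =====

-- B builds the sentence without a matches list and without branching on count 1/2/3: a counting
-- pass, then an indexed emission pass picking each hit's separator from its position; same cost.

-- ===== PORT A =====
def pvAnimalsA : List String := ["lion", "tiger", "bear", "dog"]

def four_legged_animals (user_list : List String) : String :=
  let mts := user_list.filter (fun a => pvAnimalsA.contains a)
  let count := mts.length
  let explanation :=
    if count = 0 then "There are no 4 legged animals."
    else if count = 1 then
      "'" ++ ((PySem.List.pyGet? mts 0).getD "") ++ "' has four legs."
    else if count = 2 then
      "'" ++ ((PySem.List.pyGet? mts 0).getD "") ++ "' and '" ++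
        ((PySem.List.pyGet? mts 1).getD "") ++ "' have four legs."
    else
      PySem.Str.join ", " ((PySem.List.slice mts none (some (-1))).map (fun m => "'" ++ m ++ "'"))
        ++ (", and '" ++ ((PySem.List.pyGet? mts (-1)).getD "") ++ "' have four legs.")
  "Count: " ++ PySem.Int.toStr (count : Int) ++ ". Explanation: From the selected inputs " ++ explanation

-- ===== PORT B =====
def pvAnimalsB : PySem.Set String := PySem.Set.ofList ["lion", "tiger", "bear", "dog"]

def four_legged_animals_alt (user_list : List String) : String :=
  let n := user_list.foldl (fun s a => s + (if PySem.Set.contains pvAnimalsB a then 1 else 0)) 0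
  let explanation :=
    if n = 0 then "There are no 4 legged animals."
    else
      let pieces := (user_list.foldl (fun (st : Nat × List String) a =>
          if PySem.Set.contains pvAnimalsB a then
            let sep := if st.1 = 0 then "" else if n = 2 then " and "
                       else if st.1 = n - 1 then ", and " else ", "
            (st.1 + 1, st.2 ++ [sep ++ "'" ++ a ++ "'"])
          else st) (0, ([] : List String))).2
      PySem.Str.join "" pieces ++ (if n = 1 then " has" else " have") ++ " four legs."
  "Count: " ++ PySem.Int.toStr (n : Int) ++ ". Explanation: From the selected inputs " ++ explanation

-- ===== PRECONDITION & SPEC =====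
def Spec_four_legged_animals (user_list : List String) (out : String) : Prop := out = four_legged_animals_alt user_list
instance (user_list : List String) (out : String) : Decidable (Spec_four_legged_animals user_list out) := by unfold Spec_four_legged_animals; infer_instance

-- ===== CLAIM (what is proved, stated in full; the proofs are below) =====
def Claim_equal_four_legged_animals : Prop := ∀ (user_list : List String), Dom_four_legged_animals user_list → Spec_four_legged_animals user_list (four_legged_animals user_list)

-- ===== LEMMAS AND PROOFS =====

-- B's separator table and emission, as structural recursion (proof helpers)
def pvSep (n j : Nat) : String :=
  if j = 0 then "" else if n = 2 then " and " else if j = n - 1 then ", and " else ", "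

def pvPieces (n : Nat) : Nat → List String → List String
  | _, [] => []
  | j, a :: t => (pvSep n j ++ "'" ++ a ++ "'") :: pvPieces n (j + 1) t

-- A's three-plus tail, as structural recursion (as in pv_core)
def pvTailRec : List String → String
  | [] => ""
  | [x] => ", and '" ++ x ++ "'"
  | x :: rest => ", '" ++ x ++ "'" ++ pvTailRec rest

lemma pv_count_eq (p : String → Bool) : ∀ (l : List String) (s : Nat),
    l.foldl (fun s a => s + (if p a then 1 else 0)) s = s + (l.filter p).length := by
  intro l
  induction l with
  | nil => intro s; simp
  | cons x t ih =>
      intro s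
      by_cases h : p x = true
      · simp [h, ih]; omega
      · simp [h, ih]

lemma pv_fold_filter (n : Nat) : ∀ (l : List String) (st : Nat × List String),
    l.foldl (fun (st : Nat × List String) a =>
        if pvAnimalsA.contains a then
          (st.1 + 1, st.2 ++ [(if st.1 = 0 then "" else if n = 2 then " and "
                     else if st.1 = n - 1 then ", and " else ", ") ++ "'" ++ a ++ "'"])
        else st) st
      = (l.filter (fun a => pvAnimalsA.contains a)).foldl
          (fun (st : Nat × List String) a =>
            (st.1 + 1, st.2 ++ [pvSep n st.1 ++ "'" ++ a ++ "'"])) st := by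
  intro l
  induction l with
  | nil => intro st; rfl
  | cons x t ih =>
      intro st
      by_cases h : pvAnimalsA.contains x = true
      · simp only [List.foldl_cons, List.filter_cons, h, if_true]
        rw [ih]
        rfl
      · have h' : (pvAnimalsA.contains x = true) = False := eq_false h
        simp only [List.foldl_cons, List.filter_cons, h', if_false]
        exact ih st

lemma pv_fold_pieces (n : Nat) : ∀ (ms : List String) (j : Nat) (acc : List String),
    (ms.foldl (fun (st : Nat × List String) a =>
        (st.1 + 1, st.2 ++ [pvSep n st.1 ++ "'" ++ a ++ "'"])) (j, acc)).2
      = acc ++ pvPieces n j ms := by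
  intro ms
  induction ms with
  | nil => intro j acc; simp [pvPieces]
  | cons x t ih => intro j acc; simp [pvPieces, ih]

-- the three-plus tail: B's positional pieces join to the recursive rendering
lemma pv_join_nil : ∀ (ps : List (List Char)), PySem.Chars.join [] ps = ps.flatten
  | [] => by simp [PySem.Chars.join_nil]
  | [x] => by simp [PySem.Chars.join_singleton]
  | x :: y :: t => by
      rw [PySem.Chars.join_cons_cons, pv_join_nil (y :: t)]
      simp

lemma pv_tail_join (n : Nat) : ∀ (t : List String) (x : String) (j : Nat),
    1 ≤ j → n ≠ 2 → j + (x :: t).length = n →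
    PySem.Str.join "" (pvPieces n j (x :: t)) = pvTailRec (x :: t) := by
  intro t
  induction t with
  | nil =>
      intro x j h1 h2 h3
      have hj0 : ¬ j = 0 := by omega
      have hj : j = n - 1 := by simp at h3; omega
      have hj1 : ¬ (n - 1 = 0) := by omega
      rw [← String.toList_inj]
      simp [pvPieces, pvSep, pvTailRec, h2, hj, hj1, PySem.Str.toList_join,
        String.toList_append]
  | cons y t' ih =>
      intro x j h1 h2 h3
      have hj0 : ¬ j = 0 := by omega
      have hjl : ¬ j = n - 1 := by simp at h3; omega
      have h3' : (j + 1) + (y :: t').length = n := by simp at h3 ⊢; omega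
      have hthis := ih y (j + 1) (by omega) h2 h3'
      rw [← String.toList_inj] at hthis ⊢
      simp only [PySem.Str.toList_join, show ("".toList = ([] : List Char)) from rfl,
        pv_join_nil] at hthis ⊢
      rw [show pvPieces n j (x :: y :: t')
            = (pvSep n j ++ "'" ++ x ++ "'") :: pvPieces n (j + 1) (y :: t') from rfl]
      simp only [List.map_cons, List.flatten_cons, hthis]
      simp [pvTailRec, pvSep, hj0, h2, hjl, String.toList_append]

-- the three-plus case on A's side: the join over quoted dropLast + ", and '<last>'" tail
-- equals "'a'" ++ pvTailRec tail
lemma pv_core : ∀ (t : List String) (x a : String),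
    PySem.Chars.join (", ".toList)
        ((("'" ++ a ++ "'") :: ((x :: t).dropLast).map (fun m => "'" ++ m ++ "'")).map String.toList)
      ++ (", and '".toList) ++ ((((x :: t).getLast?).getD "").toList) ++ ("'".toList)
    = ("'" ++ a ++ "'").toList ++ (pvTailRec (x :: t)).toList := by
  intro t
  induction t with
  | nil =>
      intro x a
      simp [PySem.Chars.join_singleton, pvTailRec, String.toList_append]
  | cons y t' ih =>
      intro x a
      have h1 : ((x :: y :: t').dropLast).map (fun m => "'" ++ m ++ "'")
          = ("'" ++ x ++ "'") :: ((y :: t').dropLast).map (fun m => "'" ++ m ++ "'") := by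
        simp
      rw [h1]
      have h2 := ih y x
      simp only [List.map_cons] at h2 ⊢
      rw [PySem.Chars.join_cons_cons]
      have h3 : (y :: t').getLast? = (x :: y :: t').getLast? := by
        simp [List.getLast?_cons_cons]
      rw [← h3] at *
      simp only [List.append_assoc] at h2 ⊢
      rw [h2]
      show _ = _
      simp [pvTailRec, String.toList_append]

-- the explanation strings agree, given the matches list
lemma pv_expl_eq (ms : List String) :
    (if ms.length = 0 then "There are no 4 legged animals."
     else if ms.length = 1 then
       "'" ++ ((PySem.List.pyGet? ms 0).getD "") ++ "' has four legs."
     else if ms.length = 2 then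
       "'" ++ ((PySem.List.pyGet? ms 0).getD "") ++ "' and '" ++
         ((PySem.List.pyGet? ms 1).getD "") ++ "' have four legs."
     else
       PySem.Str.join ", " ((PySem.List.slice ms none (some (-1))).map (fun m => "'" ++ m ++ "'"))
         ++ (", and '" ++ ((PySem.List.pyGet? ms (-1)).getD "") ++ "' have four legs."))
    = (if ms.length = 0 then "There are no 4 legged animals."
       else
         PySem.Str.join "" (pvPieces ms.length 0 ms)
           ++ (if ms.length = 1 then " has" else " have") ++ " four legs.") := by
  match ms with
  | [] => rfl
  | [a] =>
      rw [← String.toList_inj]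
      simp [PySem.List.pyGet?, PySem.List.pyIdx?, pvPieces, pvSep,
        PySem.Str.toList_join, String.toList_append]
  | [a, b] =>
      rw [← String.toList_inj]
      simp [PySem.List.pyGet?, PySem.List.pyIdx?, pvPieces, pvSep,
        PySem.Str.toList_join, pv_join_nil, String.toList_append]
  | a :: x :: c :: t =>
      have hlen : (a :: x :: c :: t).length = t.length + 3 := by simp
      rw [hlen]
      rw [if_neg (by omega), if_neg (by omega), if_neg (by omega), if_neg (by omega),
          if_neg (by omega)]
      have hpieces : pvPieces (t.length + 3) 0 (a :: x :: c :: t)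
          = (pvSep (t.length + 3) 0 ++ "'" ++ a ++ "'") :: pvPieces (t.length + 3) 1 (x :: c :: t) := rfl
      have hsep0 : pvSep (t.length + 3) 0 = "" := by simp [pvSep]
      have htail := pv_tail_join (t.length + 3) (c :: t) x 1 (by omega) (by omega) (by simp; omega)
      rw [← String.toList_inj]
      rw [PySem.List.slice_to_neg_one, PySem.List.pyGet?_neg_one]
      have hd : (a :: x :: c :: t).dropLast = a :: ((x :: c :: t).dropLast) := by simp
      have hl : (a :: x :: c :: t).getLast? = (x :: c :: t).getLast? := by
        simp [List.getLast?_cons_cons]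
      rw [hd, hl]
      have hcore := pv_core (c :: t) x a
      -- RHS: join "" pieces = "'a'" ++ pvTailRec (x :: c :: t)
      have hrhs : (PySem.Str.join "" (pvPieces (t.length + 3) 0 (a :: x :: c :: t))).toList
          = ("'" ++ a ++ "'").toList ++ (pvTailRec (x :: c :: t)).toList := by
        rw [hpieces, hsep0]
        rw [← String.toList_inj] at htail
        simp only [PySem.Str.toList_join, show ("".toList = ([] : List Char)) from rfl,
          pv_join_nil, List.map_cons, List.flatten_cons] at htail ⊢
        rw [htail]
        simp [String.toList_append]
      simp only [String.toList_append, PySem.Str.toList_join, List.map_cons, List.map_map,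
        List.append_assoc] at hcore hrhs ⊢
      rw [hrhs]
      have h2 := congrArg (fun l => l ++ [' ', 'h', 'a', 'v', 'e', ' ', 'f', 'o', 'u', 'r', ' ', 'l', 'e', 'g', 's', '.']) hcore
      simpa [List.append_assoc] using h2

-- ===== VERDICT (by name: the statement is the Claim_ definition above) =====
theorem four_legged_animals_spec : Claim_equal_four_legged_animals := by
  intro user_list _
  unfold Spec_four_legged_animals four_legged_animals four_legged_animals_alt
  have hp : (fun a => PySem.Set.contains pvAnimalsB a) = (fun a => pvAnimalsA.contains a) := by
    funext a; rfl
  simp only [hp]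
  rw [pv_count_eq (fun a => pvAnimalsA.contains a) user_list 0]
  simp only [Nat.zero_add]
  rw [pv_fold_filter ((user_list.filter (fun a => pvAnimalsA.contains a)).length) user_list (0, [])]
  rw [pv_fold_pieces]
  simp only [List.nil_append]
  exact congrArg _ (pv_expl_eq _)
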